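-- pv_equiv track=rewrite | github.com/DavidCalebChaparroOrozco/Daily-Projects | Recursion/DNASequenceMutations.py | generate_mutations
-- ===== SOURCE A (Python) =====
-- def generate_mutations(start_sequence, target_sequence):
--     """
--     Args:
--         start_sequence: Initial DNA sequence (uppercase, only contains A, T, C, G)
--         target_sequence: Target DNA sequence (same length as start_sequence)
--
--     Returns:
--         list: List of mutation paths from start to target sequence
--     """
--
--     # Validate input sequences
--     if len(start_sequence) != len(target_sequence):
--         raise ValueError("Start and target sequences must be of equal length")
--
--     valid_nucleotides = {'A', 'T', 'C', 'G'}
--     for seq in [start_sequence, target_sequence]: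
--         if not all(nucleotide in valid_nucleotides for nucleotide in seq):
--             raise ValueError("Sequences can only contain A, T, C, G nucleotides")
--
--     # If sequences are already the same
--     if start_sequence == target_sequence:
--         return [[start_sequence]]
--
--     # Initialize variables for BFS (Breadth-First Search)
--     from collections import deque
--     queue = deque()
--     queue.append([start_sequence])
--     found_paths = []
--
--     while queue:
--         current_path = queue.popleft()
--         last_sequence = current_path[-1]
--
--         # Generate all possible next mutations
--         for i in range(len(last_sequence)):
--             if last_sequence[i] != target_sequence[i]:
--                 # Only mutate to the target nucleotide at this position
--                 mutated_sequence = (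
--                     last_sequence[:i] + target_sequence[i] + last_sequence[i+1:]
--                 )
--
--                 # Avoid cycles by checking if this sequence is already in the path
--                 if mutated_sequence not in current_path:
--                     new_path = current_path.copy()
--                     new_path.append(mutated_sequence)
--
--                     # Check if we've reached the target
--                     if mutated_sequence == target_sequence:
--                         found_paths.append(new_path)
--                     else:
--                         queue.append(new_path)
--
--     return found_paths
-- ===== SOURCE B (Python) =====
-- def generate_mutations(start_sequence, target_sequence):
--     if len(start_sequence) != len(target_sequence):
--         raise ValueError("Start and target sequences must be of equal length")
--     valid_nucleotides = {'A', 'T', 'C', 'G'}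
--     for seq in [start_sequence, target_sequence]:
--         if not all(nucleotide in valid_nucleotides for nucleotide in seq):
--             raise ValueError("Sequences can only contain A, T, C, G nucleotides")
--
--     # Depth-first recursion: at each step mutate any still-differing position
--     # (in ascending order) to its target nucleotide; a sequence with no
--     # differences is the end of a path.
--     def rec(seq):
--         diffs = [i for i in range(len(seq)) if seq[i] != target_sequence[i]]
--         if not diffs:
--             return [[seq]]
--         return [[seq] + tail
--                 for i in diffs
--                 for tail in rec(seq[:i] + target_sequence[i] + seq[i + 1:])]
--
--     return rec(start_sequence)
-- ===== Notes on version B (the rewrite author's own statement) =====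
-- stated objective: simpler
-- what changed: Replaces the BFS over a queue of whole paths (with cycle-membership checks and a separate found_paths list) by a direct depth-first recursion: recompute the differing positions of the current sequence and recurse on each single-position fix, a sequence with no differences being a finished path; same validations, same lexicographic output order.
import Mathlib
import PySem

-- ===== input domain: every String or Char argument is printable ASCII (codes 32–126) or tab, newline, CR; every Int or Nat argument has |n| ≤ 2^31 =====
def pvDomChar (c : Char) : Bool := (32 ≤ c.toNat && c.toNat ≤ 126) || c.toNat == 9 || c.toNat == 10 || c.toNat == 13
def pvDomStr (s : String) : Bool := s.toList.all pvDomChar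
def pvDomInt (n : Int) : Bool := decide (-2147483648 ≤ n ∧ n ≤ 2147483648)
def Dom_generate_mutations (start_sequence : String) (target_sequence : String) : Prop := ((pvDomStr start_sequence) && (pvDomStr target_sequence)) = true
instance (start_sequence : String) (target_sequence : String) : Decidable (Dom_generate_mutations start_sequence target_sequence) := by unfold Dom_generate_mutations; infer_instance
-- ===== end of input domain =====

-- B replaces A's breadth-first queue of paths (with cycle checks and a found_paths list) by a
-- direct depth-first recursion over the still-differing positions; same validations, same output.

-- ===== PORT A =====
-- nucleotide in {'A','T','C','G'} : membership in the literal set, as list membership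
def pvValidA (s : List Char) : Bool := s.all (fun c => decide (c ∈ (['A', 'T', 'C', 'G'] : List Char)))

-- last_sequence[:i] + target_sequence[i] + last_sequence[i+1:]
def pvMutA (last target : List Char) (i : Int) : List Char :=
  PySem.List.slice last none (some i) ++ [PySem.List.pyGetD target i ' '] ++ PySem.List.slice last (some (i + 1)) none

-- the `while queue:` loop; fuel only makes the recursion total ((len+1)! bounds the iterations)
def pvLoopA (target : List Char) : Nat → List (List (List Char)) → List (List (List Char)) → List (List (List Char))
  | _, [], found => found
  | 0, _ :: _, found => found
  | fuel + 1, path :: rest, found =>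
    let last := PySem.List.pyGetD path (-1) []
    let st := (PySem.List.pyRange 0 (last.length : Int) 1).foldl
      (fun (qf : List (List (List Char)) × List (List (List Char))) i =>
        if PySem.List.pyGetD last i ' ' ≠ PySem.List.pyGetD target i ' ' then
          let m := pvMutA last target i
          if m ∉ path then
            if m = target then (qf.1, qf.2 ++ [path ++ [m]])
            else (qf.1 ++ [path ++ [m]], qf.2)
          else qf
        else qf) (rest, found)
    pvLoopA target fuel st.1 st.2

def generate_mutations (start_sequence : String) (target_sequence : String) : List (List String) :=
  let start := start_sequence.toList
  let target := target_sequence.toList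
  if start.length ≠ target.length then []        -- Python raises ValueError: outside Pre_
  else if ¬ (pvValidA start = true ∧ pvValidA target = true) then []   -- ValueError: outside Pre_
  else if start = target then [[start_sequence]]
  else (pvLoopA target (Nat.factorial (start.length + 1)) [[start]] []).map
    (fun p => p.map String.ofList)

-- ===== PORT B =====
def pvValidB (s : List Char) : Bool := s.all (fun c => decide (c ∈ (['A', 'T', 'C', 'G'] : List Char)))

def pvMutB (seq target : List Char) (i : Int) : List Char :=
  PySem.List.slice seq none (some i) ++ [PySem.List.pyGetD target i ' '] ++ PySem.List.slice seq (some (i + 1)) none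

-- [i for i in range(len(seq)) if seq[i] != target_sequence[i]]
def pvDiffs (seq target : List Char) : List Int :=
  (PySem.List.pyRange 0 (seq.length : Int) 1).filter
    (fun i => decide (PySem.List.pyGetD seq i ' ' ≠ PySem.List.pyGetD target i ' '))

-- rec(seq); fuel only makes the recursion total (len+1 bounds the depth)
def pvRecB (target : List Char) : Nat → List Char → List (List (List Char))
  | 0, _ => []
  | fuel + 1, seq =>
    let diffs := pvDiffs seq target
    if diffs = [] then [[seq]]
    else diffs.flatMap (fun i => (pvRecB target fuel (pvMutB seq target i)).map (fun tail => seq :: tail))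

def generate_mutations_alt (start_sequence : String) (target_sequence : String) : List (List String) :=
  let start := start_sequence.toList
  let target := target_sequence.toList
  if start.length ≠ target.length then []        -- Python raises ValueError: outside Pre_
  else if ¬ (pvValidB start = true ∧ pvValidB target = true) then []   -- ValueError: outside Pre_
  else (pvRecB target (start.length + 1) start).map (fun p => p.map String.ofList)

-- ===== PRECONDITION & SPEC =====
-- Pre_ excludes exactly the inputs on which A raises ValueError: unequal lengths, or a
-- character outside {A,T,C,G} in either sequence.
def Pre_generate_mutations (start_sequence : String) (target_sequence : String) : Prop :=
  start_sequence.toList.length = target_sequence.toList.length ∧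
  (start_sequence.toList.all (fun c => decide (c ∈ (['A', 'T', 'C', 'G'] : List Char)))) = true ∧
  (target_sequence.toList.all (fun c => decide (c ∈ (['A', 'T', 'C', 'G'] : List Char)))) = true
instance (start_sequence : String) (target_sequence : String) : Decidable (Pre_generate_mutations start_sequence target_sequence) := by
  unfold Pre_generate_mutations; infer_instance

def pvWitness_generate_mutations : String × String := ("AAT", "ATA")

def Spec_generate_mutations (start_sequence : String) (target_sequence : String) (out : List (List String)) : Prop := out = generate_mutations_alt start_sequence target_sequence
instance (start_sequence : String) (target_sequence : String) (out : List (List String)) : Decidable (Spec_generate_mutations start_sequence target_sequence out) := by unfold Spec_generate_mutations; infer_instance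

-- ===== CLAIM (what is proved, stated in full; the proofs are below) =====
def Claim_equal_generate_mutations : Prop := ∀ (start_sequence : String) (target_sequence : String), Dom_generate_mutations start_sequence target_sequence → Pre_generate_mutations start_sequence target_sequence → Spec_generate_mutations start_sequence target_sequence (generate_mutations start_sequence target_sequence)

-- ===== LEMMAS AND PROOFS =====

-- Nat-level clean versions of the shared combinatorics
def dN (t l : List Char) : List Nat :=
  (List.range t.length).filter (fun j => decide (l.getD j ' ' ≠ t.getD j ' '))

def mutN (t l : List Char) (j : Nat) : List Char := l.set j (t.getD j ' ')

def dcN (t l : List Char) : Nat := (dN t l).length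

def GN (t : List Char) : Nat → List Char → List (List (List Char))
  | 0, _ => []
  | k + 1, l =>
    if dN t l = [] then [[l]]
    else (dN t l).flatMap (fun j => (GN t k (mutN t l j)).map (fun c => l :: c))

def Gc (t l : List Char) : List (List (List Char)) := GN t (dcN t l + 1) l

def lastD (p : List (List Char)) : List Char := p.getLast?.getD []

def flatG (t : List Char) (p : List (List Char)) : List (List (List Char)) :=
  (Gc t (lastD p)).map (fun c => p.dropLast ++ c)

def Ffuel : Nat → Nat
  | 0 => 0
  | r + 1 => 1 + (r + 1) * Ffuel r

lemma mutN_length (t l : List Char) (j : Nat) : (mutN t l j).length = l.length := by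
  simp [mutN]

lemma mem_dN (t l : List Char) (j : Nat) :
    j ∈ dN t l ↔ j < t.length ∧ l.getD j ' ' ≠ t.getD j ' ' := by
  simp [dN]

lemma dN_nodup (t l : List Char) : (dN t l).Nodup :=
  (List.nodup_range).filter _

lemma getD_mutN (t l : List Char) (j k : Nat) (hj : j < l.length) :
    (mutN t l j).getD k ' ' = if k = j then t.getD j ' ' else l.getD k ' ' := by
  unfold mutN
  rcases eq_or_ne k j with rfl | h
  · simp [List.getD, List.getElem?_set_self hj]
  · simp [List.getD, List.getElem?_set_ne (Ne.symm h), h]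

lemma dN_mutN (t l : List Char) (j : Nat) (hlen : l.length = t.length) (hj : j ∈ dN t l) :
    dN t (mutN t l j) = (dN t l).filter (fun k => decide (k ≠ j)) := by
  have hj' := (mem_dN t l j).mp hj
  have hjl : j < l.length := by omega
  unfold dN
  rw [List.filter_filter]
  apply List.filter_congr
  intro k hk
  have hkt : k < t.length := List.mem_range.mp hk
  rw [getD_mutN t l j k hjl]
  rcases eq_or_ne k j with rfl | h
  · simp
  · simp [h]

lemma dcN_mutN (t l : List Char) (j : Nat) (hlen : l.length = t.length) (hj : j ∈ dN t l) :
    dcN t (mutN t l j) + 1 = dcN t l := by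
  have hnd := dN_nodup t l
  have := dN_mutN t l j hlen hj
  unfold dcN
  rw [this]
  have herase : (dN t l).erase j = (dN t l).filter (fun k => decide (k ≠ j)) := by
    simpa using hnd.erase_eq_filter j
  rw [← herase, List.length_erase_of_mem hj]
  have : 1 ≤ (dN t l).length := List.length_pos_of_mem hj
  omega

lemma dN_nil_iff (t l : List Char) (hlen : l.length = t.length) :
    dN t l = [] ↔ l = t := by
  constructor
  · intro h
    apply List.ext_getElem (by omega)
    intro i h1 h2
    have : i ∉ dN t l := by simp [h]
    rw [mem_dN] at this
    have h3 : l.getD i ' ' = t.getD i ' ' := by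
      by_contra hne
      exact this ⟨by omega, hne⟩
    rw [List.getD_eq_getElem _ _ h1, List.getD_eq_getElem _ _ h2] at h3
    exact h3
  · rintro rfl
    unfold dN
    apply List.filter_eq_nil_iff.mpr
    intro j hj
    simp

lemma dcN_le (t l : List Char) : dcN t l ≤ t.length := by
  unfold dcN dN
  calc ((List.range t.length).filter _).length ≤ (List.range t.length).length := List.length_filter_le _ _
    _ = t.length := List.length_range

lemma dcN_pos_of_ne (t l : List Char) (hlen : l.length = t.length) (h : l ≠ t) :
    1 ≤ dcN t l := by
  have : dN t l ≠ [] := fun hnil => h ((dN_nil_iff t l hlen).mp hnil)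
  have := List.length_pos_of_ne_nil this
  unfold dcN
  omega

lemma mutA_eq (t l : List Char) (j : Nat) (hj : j < l.length) :
    pvMutA l t (j : Int) = mutN t l j := by
  unfold pvMutA mutN
  rw [PySem.List.slice_to_natCast]
  have : ((j : Int) + 1) = ((j + 1 : Nat) : Int) := by push_cast; ring
  rw [this, PySem.List.slice_from_natCast, PySem.List.pyGetD_natCast]
  rw [List.set_eq_take_cons_drop _ hj]
  simp

lemma mutB_eq (t l : List Char) (j : Nat) (hj : j < l.length) :
    pvMutB l t (j : Int) = mutN t l j := by
  unfold pvMutB mutN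
  rw [PySem.List.slice_to_natCast]
  have : ((j : Int) + 1) = ((j + 1 : Nat) : Int) := by push_cast; ring
  rw [this, PySem.List.slice_from_natCast, PySem.List.pyGetD_natCast]
  rw [List.set_eq_take_cons_drop _ hj]
  simp

lemma pvDiffs_eq (t l : List Char) (hlen : l.length = t.length) :
    pvDiffs l t = (dN t l).map (fun j : Nat => (j : Int)) := by
  unfold pvDiffs dN
  rw [hlen, PySem.List.pyRange_zero_natCast, List.filter_map]
  have h : List.filter ((fun i => decide (PySem.List.pyGetD l i ' ' ≠ PySem.List.pyGetD t i ' ')) ∘ (fun k : Nat => (k : Int))) (List.range t.length) = List.filter (fun j => decide (l.getD j ' ' ≠ t.getD j ' ')) (List.range t.length) := by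
    apply List.filter_congr
    intro j hj
    simp
  rw [h]

-- GN is fuel-irrelevant above the diff count
lemma GN_congr (t : List Char) : ∀ N l k1 k2, l.length = t.length → dcN t l < N →
    dcN t l < k1 → dcN t l < k2 → GN t k1 l = GN t k2 l := by
  intro N
  induction N with
  | zero => intro l k1 k2 _ hN _ _; omega
  | succ N ih =>
    intro l k1 k2 hlen hN h1 h2
    match k1, k2 with
    | a + 1, b + 1 =>
      simp only [GN]
      by_cases hnil : dN t l = []
      · simp [hnil]
      · rw [if_neg hnil, if_neg hnil, List.flatMap_def, List.flatMap_def]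
        refine congrArg List.flatten (List.map_congr_left ?_)
        intro j hj
        have hjl : j < l.length := by
          have := (mem_dN t l j).mp hj
          omega
        have hpos : 1 ≤ dcN t l := by
          have : 1 ≤ (dN t l).length := List.length_pos_of_mem hj
          simpa [dcN] using this
        have hdec := dcN_mutN t l j hlen hj
        have hlen' : (mutN t l j).length = t.length := by rw [mutN_length]; exact hlen
        rw [ih (mutN t l j) a b hlen' (by omega) (by omega) (by omega)]

lemma GN_eq_Gc (t l : List Char) (k : Nat) (hlen : l.length = t.length) (hk : dcN t l < k) :
    GN t k l = Gc t l := by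
  unfold Gc
  exact GN_congr t (dcN t l + 1) l k (dcN t l + 1) hlen (by omega) hk (by omega)

-- B's recursion computes GN
lemma pvRecB_eq (t : List Char) : ∀ k l, l.length = t.length → pvRecB t k l = GN t k l := by
  intro k
  induction k with
  | zero => intro l _; simp [pvRecB, GN]
  | succ k ih =>
    intro l hlen
    simp only [pvRecB, GN]
    rw [pvDiffs_eq t l hlen]
    by_cases hnil : dN t l = []
    · simp [hnil]
    · have hmapnil : (dN t l).map (fun j : Nat => (j : Int)) ≠ [] := by simpa using hnil
      rw [if_neg hmapnil, if_neg hnil, List.flatMap_map]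
      rw [List.flatMap_def, List.flatMap_def]
      refine congrArg List.flatten (List.map_congr_left ?_)
      intro j hj
      have hjl : j < l.length := by
        have := (mem_dN t l j).mp hj
        omega
      rw [mutB_eq t l j hjl, ih (mutN t l j) (by rw [mutN_length]; exact hlen)]

-- generic split of A's inner for-loop into queue- and found-appends
lemma foldl_split {β : Type} (d mem tg : Nat → Prop) [DecidablePred d] [DecidablePred mem]
    [DecidablePred tg] (g : Nat → β) :
    ∀ (xs : List Nat) (q0 f0 : List β),
    xs.foldl (fun (qf : List β × List β) j =>
        if d j then
          (if mem j then (if tg j then (qf.1, qf.2 ++ [g j]) else (qf.1 ++ [g j], qf.2)) else qf)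
        else qf) (q0, f0)
    = (q0 ++ ((xs.filter (fun j => decide (d j) && decide (mem j) && !decide (tg j))).map g),
       f0 ++ ((xs.filter (fun j => decide (d j) && decide (mem j) && decide (tg j))).map g)) := by
  intro xs
  induction xs with
  | nil => intro q0 f0; simp
  | cons x xs ih =>
    intro q0 f0
    simp only [List.foldl_cons, List.filter_cons]
    by_cases hd : d x
    · by_cases hm : mem x
      · by_cases ht : tg x
        · rw [if_pos hd, if_pos hm, if_pos ht, ih]
          simp [hd, hm, ht]
        · rw [if_pos hd, if_pos hm, if_neg ht, ih]
          simp [hd, hm, ht]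
      · rw [if_pos hd, if_neg hm, ih]
        simp [hd, hm]
    · rw [if_neg hd, ih]
      simp [hd]

lemma Ffuel_pos (r : Nat) (hr : 1 ≤ r) : 1 ≤ Ffuel r := by
  rcases r with _ | r
  · omega
  · simp [Ffuel]

lemma Ffuel_lt_factorial (r : Nat) : Ffuel r < Nat.factorial (r + 1) := by
  induction r with
  | zero => simp [Ffuel, Nat.factorial]
  | succ r ih =>
    have h1 : Nat.factorial (r + 2) = (r + 2) * Nat.factorial (r + 1) := rfl
    have h2 : 1 ≤ Nat.factorial (r + 1) := Nat.one_le_iff_ne_zero.mpr (Nat.factorial_ne_zero _)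
    simp only [Ffuel]
    nlinarith

lemma lastD_concat (xs : List (List Char)) (x : List Char) : lastD (xs ++ [x]) = x := by
  simp [lastD]

lemma lastD_decomp (p : List (List Char)) (h : p ≠ []) : p.dropLast ++ [lastD p] = p := by
  conv_rhs => rw [← List.dropLast_concat_getLast h]
  simp [lastD, List.getLast?_eq_some_getLast h]

lemma lastD_mem (p : List (List Char)) (h : p ≠ []) : lastD p ∈ p := by
  simp only [lastD, List.getLast?_eq_some_getLast h, Option.getD_some]
  exact List.getLast_mem h

lemma pyGetD_last (p : List (List Char)) (h : p ≠ []) :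
    PySem.List.pyGetD p (-1) ([] : List Char) = lastD p := by
  rw [PySem.List.pyGetD_neg_one p [] h]
  simp [lastD, List.getLast?_eq_some_getLast h]

lemma dcN_self (t : List Char) : dcN t t = 0 := by
  simp [dcN, dN]

lemma dN_ne_nil_of_pos (t l : List Char) (h : 1 ≤ dcN t l) : dN t l ≠ [] := by
  intro hnil
  simp [dcN, hnil] at h

lemma Gc_terminal (t m : List Char) (h : dcN t m = 0) : Gc t m = [[m]] := by
  have hnil : dN t m = [] := List.length_eq_zero_iff.mp h
  unfold Gc
  rw [h]
  simp [GN, hnil]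

lemma Gc_step (t l : List Char) (hlt : l.length = t.length) (hpos : 1 ≤ dcN t l) :
    Gc t l = (dN t l).flatMap (fun j => (Gc t (mutN t l j)).map (fun c => l :: c)) := by
  have hnil : dN t l ≠ [] := dN_ne_nil_of_pos t l hpos
  unfold Gc
  conv_lhs => rw [GN]
  rw [if_neg hnil, List.flatMap_def, List.flatMap_def]
  refine congrArg List.flatten (List.map_congr_left ?_)
  intro j hj
  congr 1
  exact GN_eq_Gc t (mutN t l j) (dcN t l) (by rw [mutN_length]; exact hlt)
    (by have := dcN_mutN t l j hlt hj; omega)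

lemma flatG_concat (t : List Char) (p : List (List Char)) (m : List Char) :
    flatG t (p ++ [m]) = (Gc t m).map (fun c => p ++ c) := by
  unfold flatG
  rw [lastD_concat, List.dropLast_concat]

lemma flatG_cons (t : List Char) (p : List (List Char)) (hpne : p ≠ [])
    (hlt : (lastD p).length = t.length) (hpos : 1 ≤ dcN t (lastD p)) :
    ((dN t (lastD p)).map (fun j => p ++ [mutN t (lastD p) j])).flatMap (flatG t) = flatG t p := by
  rw [List.flatMap_map]
  have h1 : ∀ j, flatG t (p ++ [mutN t (lastD p) j]) =
      (Gc t (mutN t (lastD p) j)).map (fun c => p ++ c) := fun j => flatG_concat t p _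
  calc (dN t (lastD p)).flatMap (fun j => flatG t (p ++ [mutN t (lastD p) j]))
      = (dN t (lastD p)).flatMap (fun j => (Gc t (mutN t (lastD p) j)).map (fun c => p ++ c)) := by
        simp only [h1]
    _ = flatG t p := by
        unfold flatG
        rw [Gc_step t (lastD p) hlt hpos, List.map_flatMap]
        rw [List.flatMap_def, List.flatMap_def]
        refine (congrArg List.flatten (List.map_congr_left ?_)).symm
        intro j hj
        rw [List.map_map]
        refine List.map_congr_left ?_
        intro c hc
        show p.dropLast ++ (lastD p :: c) = p ++ c
        rw [← List.singleton_append, ← List.append_assoc, lastD_decomp p hpne]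

-- the BFS lemma: A's queue loop produces the depth-first enumeration
lemma bfs (t : List Char) : ∀ K fuel r (H T : List (List (List Char))) found,
    fuel + r ≤ K → 1 ≤ r →
    (∀ p ∈ H, p ≠ [] ∧ (∀ x ∈ p, x.length = t.length) ∧ (∀ x ∈ p, r ≤ dcN t x) ∧
      dcN t (lastD p) = r) →
    (∀ p ∈ T, p ≠ [] ∧ (∀ x ∈ p, x.length = t.length) ∧ (∀ x ∈ p, r - 1 ≤ dcN t x) ∧
      dcN t (lastD p) + 1 = r ∧ 2 ≤ r) →
    H.length * Ffuel r + T.length * Ffuel (r - 1) ≤ fuel →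
    pvLoopA t fuel (H ++ T) found = found ++ T.flatMap (flatG t) ++ H.flatMap (flatG t) := by
  intro K
  induction K with
  | zero => intro fuel r H T found hK hr _ _ _; omega
  | succ K ih =>
    intro fuel r H T found hK hr hH hT hfuel
    cases H with
    | nil =>
      cases T with
      | nil => cases fuel <;> simp [pvLoopA]
      | cons q T' =>
        have h2r : 2 ≤ r := (hT q List.mem_cons_self).2.2.2.2
        have hres := ih fuel (r - 1) (q :: T') [] found (by omega) (by omega)
          (by
            intro p hp
            obtain ⟨h1, h2, h3, h4, _⟩ := hT p hp
            exact ⟨h1, h2, h3, by omega⟩)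
          (by intro p hp; simp at hp)
          (by simpa using hfuel)
        simpa using hres
    | cons p H' =>
      obtain ⟨hpne, hplen, hpall, hplast⟩ := hH p List.mem_cons_self
      have hF1 : 1 ≤ Ffuel r := Ffuel_pos r hr
      have hfpos : 1 ≤ fuel := by
        refine le_trans ?_ (le_trans (Nat.le_add_right _ _) hfuel)
        have h1 : 1 ≤ (p :: H').length := by simp
        exact Nat.one_le_iff_ne_zero.mpr (Nat.mul_ne_zero (by omega) (by omega))
      obtain ⟨f, rfl⟩ : ∃ f, fuel = f + 1 := ⟨fuel - 1, by omega⟩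
      have hlp : lastD p ∈ p := lastD_mem p hpne
      have hlt : (lastD p).length = t.length := hplen _ hlp
      show pvLoopA t (f + 1) (p :: (H' ++ T)) found = _
      rw [pvLoopA]
      simp only [pyGetD_last p hpne]
      rw [hlt, PySem.List.pyRange_zero_natCast, List.foldl_map]
      rw [PySem.List.foldl_congr_mem (List.range t.length) _
        (fun (qf : List (List (List Char)) × List (List (List Char))) (j : Nat) =>
          if (fun j => (lastD p).getD j ' ' ≠ t.getD j ' ') j then
            (if (fun j => mutN t (lastD p) j ∉ p) j then
              (if (fun j => mutN t (lastD p) j = t) j then (qf.1, qf.2 ++ [(fun j => p ++ [mutN t (lastD p) j]) j])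
               else (qf.1 ++ [(fun j => p ++ [mutN t (lastD p) j]) j], qf.2))
             else qf)
          else qf) (H' ++ T, found)
        (by
          intro acc j hj
          have hjl : j < (lastD p).length := by rw [hlt]; exact List.mem_range.mp hj
          simp only [PySem.List.pyGetD_natCast, mutA_eq t (lastD p) j hjl])]
      rw [foldl_split (fun j => (lastD p).getD j ' ' ≠ t.getD j ' ')
        (fun j => mutN t (lastD p) j ∉ p) (fun j => mutN t (lastD p) j = t)
        (fun j => p ++ [mutN t (lastD p) j]) (List.range t.length) (H' ++ T) found]
      have hkey : ∀ j ∈ List.range t.length, (lastD p).getD j ' ' ≠ t.getD j ' ' →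
          j ∈ dN t (lastD p) ∧ mutN t (lastD p) j ∉ p ∧ dcN t (mutN t (lastD p) j) + 1 = r := by
        intro j hj hd
        have hjmem : j ∈ dN t (lastD p) := (mem_dN t (lastD p) j).mpr ⟨List.mem_range.mp hj, hd⟩
        have hmdc : dcN t (mutN t (lastD p) j) + 1 = r := by
          rw [← hplast]; exact dcN_mutN t (lastD p) j hlt hjmem
        refine ⟨hjmem, fun hin => ?_, hmdc⟩
        have := hpall _ hin
        omega
      rcases Nat.lt_or_ge r 2 with hr1 | hr2
      · -- r = 1 : every mutation completes the path
        have hTnil : T = [] := by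
          cases T with
          | nil => rfl
          | cons q T' => exact absurd ((hT q List.mem_cons_self).2.2.2.2) (by omega)
        subst hTnil
        have hterm : ∀ j ∈ List.range t.length, (lastD p).getD j ' ' ≠ t.getD j ' ' →
            mutN t (lastD p) j = t := by
          intro j hj hd
          have hmdc := (hkey j hj hd).2.2
          have h0 : dN t (mutN t (lastD p) j) = [] :=
            List.length_eq_zero_iff.mp (by unfold dcN at hmdc; omega)
          exact (dN_nil_iff t _ (by rw [mutN_length]; exact hlt)).mp h0
        have hfilt1 : (List.range t.length).filter
            (fun j => decide ((lastD p).getD j ' ' ≠ t.getD j ' ') && decide (mutN t (lastD p) j ∉ p) && !decide (mutN t (lastD p) j = t)) = [] := by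
          apply List.filter_eq_nil_iff.mpr
          intro j hj
          by_cases hd : (lastD p).getD j ' ' ≠ t.getD j ' '
          · have hmt := hterm j hj hd
            rw [List.getD_eq_getElem?_getD, List.getD_eq_getElem?_getD] at hd
            simp [hd, hmt]
          · have hd' := not_not.mp hd
            rw [List.getD_eq_getElem?_getD, List.getD_eq_getElem?_getD] at hd'
            simp [hd']
        have hfilt2 : (List.range t.length).filter
            (fun j => decide ((lastD p).getD j ' ' ≠ t.getD j ' ') && decide (mutN t (lastD p) j ∉ p) && decide (mutN t (lastD p) j = t)) = dN t (lastD p) := by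
          unfold dN
          apply List.filter_congr
          intro j hj
          by_cases hd : (lastD p).getD j ' ' ≠ t.getD j ' '
          · obtain ⟨hjmem, hnotin, hmdc⟩ := hkey j hj hd
            have hmt := hterm j hj hd
            have hnotin' : t ∉ p := hmt ▸ hnotin
            rw [List.getD_eq_getElem?_getD, List.getD_eq_getElem?_getD] at hd
            simp [hd, hnotin', hmt]
          · have hd' := not_not.mp hd
            rw [List.getD_eq_getElem?_getD, List.getD_eq_getElem?_getD] at hd'
            simp [hd']
        rw [hfilt1, hfilt2]
        have hfg : (dN t (lastD p)).map (fun j => p ++ [mutN t (lastD p) j]) = flatG t p := by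
          rw [← flatG_cons t p hpne hlt (by omega)]
          rw [List.flatMap_map]
          have hsing : ∀ j ∈ dN t (lastD p),
              flatG t (p ++ [mutN t (lastD p) j]) = [p ++ [mutN t (lastD p) j]] := by
            intro j hj
            have hdj := (mem_dN t (lastD p) j).mp hj
            have hmt := hterm j (List.mem_range.mpr hdj.1) hdj.2
            have h0 : dcN t (mutN t (lastD p) j) = 0 := by rw [hmt]; exact dcN_self t
            rw [flatG_concat, Gc_terminal t _ h0]
            rfl
          rw [List.flatMap_def, List.map_congr_left hsing]
          induction (dN t (lastD p)) with
          | nil => rfl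
          | cons a as iha => simp_all
        rw [hfg]
        have hres := ih f 1 H' [] (found ++ flatG t p)
          (by omega) (by omega)
          (by
            intro p' hp'
            obtain ⟨h1, h2, h3, h4⟩ := hH p' (List.mem_cons_of_mem p hp')
            exact ⟨h1, h2, by intro x hx; have := h3 x hx; omega, by omega⟩)
          (by intro p' hp'; simp at hp')
          (by
            have hFr : Ffuel r = 1 := by
              have h1 : r = 1 := by omega
              rw [h1]
              rfl
            rw [hFr] at hfuel
            simp only [List.length_cons, List.length_nil] at hfuel ⊢
            have hFr1 : Ffuel 1 = 1 := rfl
            rw [hFr1]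
            omega)
        simp only [List.map_nil, List.append_nil, List.flatMap_nil] at hres ⊢
        refine Eq.trans hres ?_
        simp [List.flatMap_cons, List.append_assoc]
      · -- 2 ≤ r : no mutation completes the path yet
        have hne_t : ∀ j ∈ List.range t.length, (lastD p).getD j ' ' ≠ t.getD j ' ' →
            mutN t (lastD p) j ≠ t := by
          intro j hj hd he
          have hmdc := (hkey j hj hd).2.2
          rw [he, dcN_self] at hmdc
          omega
        have hfilt2 : (List.range t.length).filter
            (fun j => decide ((lastD p).getD j ' ' ≠ t.getD j ' ') && decide (mutN t (lastD p) j ∉ p) && decide (mutN t (lastD p) j = t)) = [] := by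
          apply List.filter_eq_nil_iff.mpr
          intro j hj
          by_cases hd : (lastD p).getD j ' ' ≠ t.getD j ' '
          · have hmt := hne_t j hj hd
            rw [List.getD_eq_getElem?_getD, List.getD_eq_getElem?_getD] at hd
            simp [hd, hmt]
          · have hd' := not_not.mp hd
            rw [List.getD_eq_getElem?_getD, List.getD_eq_getElem?_getD] at hd'
            simp [hd']
        have hfilt1 : (List.range t.length).filter
            (fun j => decide ((lastD p).getD j ' ' ≠ t.getD j ' ') && decide (mutN t (lastD p) j ∉ p) && !decide (mutN t (lastD p) j = t)) = dN t (lastD p) := by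
          unfold dN
          apply List.filter_congr
          intro j hj
          by_cases hd : (lastD p).getD j ' ' ≠ t.getD j ' '
          · obtain ⟨hjmem, hnotin, hmdc⟩ := hkey j hj hd
            have hmt := hne_t j hj hd
            rw [List.getD_eq_getElem?_getD, List.getD_eq_getElem?_getD] at hd
            simp [hd, hnotin, hmt]
          · have hd' := not_not.mp hd
            rw [List.getD_eq_getElem?_getD, List.getD_eq_getElem?_getD] at hd'
            simp [hd']
        rw [hfilt1, hfilt2]
        have hchlen : ((dN t (lastD p)).map (fun j => p ++ [mutN t (lastD p) j])).length = r := by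
          rw [List.length_map]
          exact hplast
        have hres := ih f r H'
          (T ++ (dN t (lastD p)).map (fun j => p ++ [mutN t (lastD p) j])) found
          (by omega) (by omega)
          (fun p' hp' => hH p' (List.mem_cons_of_mem p hp'))
          (by
            intro p' hp'
            rcases List.mem_append.mp hp' with hp' | hp'
            · exact hT p' hp'
            · obtain ⟨j, hj, rfl⟩ := List.mem_map.mp hp'
              obtain ⟨hjmem, hnotin, hmdc⟩ := hkey j
                (List.mem_range.mpr ((mem_dN t (lastD p) j).mp hj).1) ((mem_dN t (lastD p) j).mp hj).2
              refine ⟨by simp, ?_, ?_, ?_, hr2⟩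
              · intro x hx
                rcases List.mem_append.mp hx with hx | hx
                · exact hplen x hx
                · rw [List.mem_singleton.mp hx, mutN_length]
                  exact hlt
              · intro x hx
                rcases List.mem_append.mp hx with hx | hx
                · have := hpall x hx; omega
                · rw [List.mem_singleton.mp hx]; omega
              · rw [lastD_concat]; exact hmdc)
          (by
            obtain ⟨r', rfl⟩ : ∃ r', r = r' + 1 := ⟨r - 1, by omega⟩
            have hFr : Ffuel (r' + 1) = 1 + (r' + 1) * Ffuel r' := rfl
            rw [List.length_append, hchlen]
            simp only [List.length_cons] at hfuel
            simp only [Nat.add_sub_cancel] at hfuel ⊢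
            nlinarith [hfuel, hFr])
        rw [List.append_assoc]
        simp only [List.map_nil, List.append_nil]
        refine Eq.trans hres ?_
        rw [List.flatMap_append, flatG_cons t p hpne hlt (by omega)]
        simp [List.flatMap_cons, List.append_assoc]

-- ===== VERDICT (by name: the statement is the Claim_ definition above) =====
theorem generate_mutations_spec : Claim_equal_generate_mutations := by
  intro s tq hdom hpre
  obtain ⟨hlen, hvs, hvt⟩ := hpre
  show generate_mutations s tq = generate_mutations_alt s tq
  have hv1 : pvValidA s.toList = true := hvs
  have hv2 : pvValidA tq.toList = true := hvt
  have hv3 : pvValidB s.toList = true := hvs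
  have hv4 : pvValidB tq.toList = true := hvt
  unfold generate_mutations generate_mutations_alt
  rw [if_neg (show ¬ s.toList.length ≠ tq.toList.length from not_not.mpr hlen)]
  rw [if_neg (show ¬ s.toList.length ≠ tq.toList.length from not_not.mpr hlen)]
  rw [if_neg (not_not.mpr ⟨hv1, hv2⟩), if_neg (not_not.mpr ⟨hv3, hv4⟩)]
  have hdle : dcN tq.toList s.toList ≤ s.toList.length := by
    have := dcN_le tq.toList s.toList
    omega
  rw [pvRecB_eq tq.toList _ _ hlen]
  by_cases heq : s.toList = tq.toList
  · rw [if_pos heq]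
    have hd0 : dN tq.toList s.toList = [] := by
      unfold dN
      apply List.filter_eq_nil_iff.mpr
      intro j hj
      rw [heq]
      simp
    have hGN : GN tq.toList (s.toList.length + 1) s.toList = [[s.toList]] := by
      rw [GN, if_pos hd0]
    rw [hGN]
    simp [String.ofList_toList]
  · rw [if_neg heq]
    have hr0 : 1 ≤ dcN tq.toList s.toList := dcN_pos_of_ne tq.toList s.toList hlen heq
    have hbfs := bfs tq.toList
      (Nat.factorial (s.toList.length + 1) + dcN tq.toList s.toList)
      (Nat.factorial (s.toList.length + 1)) (dcN tq.toList s.toList)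
      [[s.toList]] [] [] (le_refl _) hr0
      (by
        intro p hp
        rw [List.mem_singleton.mp hp]
        refine ⟨by simp, ?_, ?_, ?_⟩
        · intro x hx
          rw [List.mem_singleton.mp hx]
          exact hlen
        · intro x hx
          rw [List.mem_singleton.mp hx]
        · simp [lastD])
      (by intro p hp; simp at hp)
      (by
        have h1 := Ffuel_lt_factorial (dcN tq.toList s.toList)
        have h2 : dcN tq.toList s.toList + 1 ≤ s.toList.length + 1 := by omega
        have h3 := Nat.factorial_le h2
        simp only [List.length_cons, List.length_nil]
        omega)
    simp only [List.append_nil, List.flatMap_nil, List.flatMap_cons, List.nil_append,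
      List.append_nil] at hbfs
    rw [hbfs]
    have hfl : flatG tq.toList [s.toList] = Gc tq.toList s.toList := by
      simp [flatG, lastD]
    rw [hfl, GN_eq_Gc tq.toList s.toList _ hlen (by omega)]
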